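-- pv_equiv track=rewrite | github.com/Yanzheng-Wang/CSlearning | cs61a/notes.py | large
-- ===== SOURCE A (Python) =====
-- def sum_list(s):
--     if len(s) == 0:
--         return 0
--     else :
--         return s[0] + sum_list(s[1:])
--
-- def large(s, n):
--     if s == []:
--         return []
--     elif s[0] > n:
--         return large(s[1:], n)
--     else :
--         with_s0 = [s[0]] + large(s[1:], n-s[0])
--         without_s0 = large(s[1:], n)
--         if sum_list(with_s0) >= sum_list(without_s0):
--             return with_s0
--         else:
--             return without_s0
-- ===== SOURCE B (Python) =====
-- def large(s, n):
--     # Pair-carrying recursion: each call returns (subset, its sum), so the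
--     # sum of a candidate is never recomputed by rescanning the list.
--     def best(s, budget):
--         if not s:
--             return [], 0
--         x, rest = s[0], s[1:]
--         if x > budget:
--             return best(rest, budget)
--         with_subset, with_sum = best(rest, budget - x)
--         without_subset, without_sum = best(rest, budget)
--         if x + with_sum >= without_sum:
--             return [x] + with_subset, x + with_sum
--         return without_subset, without_sum
--     return best(s, n)[0]
-- ===== Notes on version B (the rewrite author's own statement) =====
-- stated objective: alternative
-- what changed: B's recursion returns (subset, sum) pairs, maintaining the running sum so A's per-node sum_list rescans disappear; measured ~2x at small sizes but both remain exponential, so no speed is claimed.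
import Mathlib
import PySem

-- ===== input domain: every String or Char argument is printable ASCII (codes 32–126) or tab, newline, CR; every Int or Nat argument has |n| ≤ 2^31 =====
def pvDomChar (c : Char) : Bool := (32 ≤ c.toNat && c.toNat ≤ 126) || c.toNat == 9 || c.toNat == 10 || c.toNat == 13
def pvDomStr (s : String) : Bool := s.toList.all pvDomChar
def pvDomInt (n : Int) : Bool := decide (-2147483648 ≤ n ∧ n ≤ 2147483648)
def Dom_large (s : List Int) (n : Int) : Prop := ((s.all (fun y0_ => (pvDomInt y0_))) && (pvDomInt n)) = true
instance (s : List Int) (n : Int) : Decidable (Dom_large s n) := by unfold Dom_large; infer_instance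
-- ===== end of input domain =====

-- B carries (subset, sum) pairs through the recursion, maintaining the running sum instead of A's sum_list rescans (return value proved equal on Dom).


-- ===== PORT A =====
def sum_list : List Int → Int
  | [] => 0
  | x :: t => x + sum_list t

def large (s : List Int) (n : Int) : List Int :=
  match s with
  | [] => []
  | x :: t =>
    if x > n then large t n
    else
      let with_s0 := x :: large t (n - x)
      let without_s0 := large t n
      if sum_list with_s0 ≥ sum_list without_s0 then with_s0 else without_s0

-- ===== PORT B =====
-- best returns (subset, its sum); the sum is maintained, never recomputed.
def bestPair : List Int → Int → List Int × Int
  | [], _ => ([], 0)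
  | x :: rest, budget =>
    if x > budget then bestPair rest budget
    else
      let (with_subset, with_sum) := bestPair rest (budget - x)
      let (without_subset, without_sum) := bestPair rest budget
      if x + with_sum ≥ without_sum then (x :: with_subset, x + with_sum)
      else (without_subset, without_sum)

def large_alt (s : List Int) (n : Int) : List Int := (bestPair s n).1

-- ===== PRECONDITION & SPEC =====
def Spec_large (s : List Int) (n : Int) (out : List Int) : Prop := out = large_alt s n
instance (s : List Int) (n : Int) (out : List Int) : Decidable (Spec_large s n out) := by unfold Spec_large; infer_instance

-- ===== CLAIM (what is proved, stated in full; the proofs are below) =====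
def Claim_equal_large : Prop := ∀ (s : List Int) (n : Int), Dom_large s n → Spec_large s n (large s n)

-- ===== LEMMAS AND PROOFS =====
-- Invariant: B's pair is A's result together with its sum.
theorem bestPair_eq (s : List Int) : ∀ n : Int, bestPair s n = (large s n, sum_list (large s n)) := by
  induction s with
  | nil => intro n; simp [bestPair, large, sum_list]
  | cons x t ih =>
    intro n
    by_cases h : x > n
    · simp [bestPair, large, h, ih]
    · simp only [bestPair, large, if_neg h, ih (n - x), ih n]
      by_cases hc : x + sum_list (large t (n - x)) ≥ sum_list (large t n)
      · rw [if_pos hc, if_pos (by simpa [sum_list] using hc)]; simp [sum_list]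
      · rw [if_neg hc, if_neg (by simpa [sum_list] using hc)]

-- ===== VERDICT (by name: the statement is the Claim_ definition above) =====
theorem large_spec : Claim_equal_large := by
  intro s n _
  unfold Spec_large large_alt
  rw [bestPair_eq]
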